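-- pv_equiv track=rewrite | github.com/travisfleish/octagon_azure_poc | archive/previous-version/sow_taxonomy_analyzer.py | _categorize_roles
-- ===== SOURCE A (Python) =====
-- from typing import Dict, List, Set, Any, Optional
--
-- def _categorize_roles(roles: List[str]) -> Dict[str, List[str]]:
--     """Categorize roles by department/function"""
--     categories = {
--         "Account Management": [],
--         "Creative": [],
--         "Strategy": [],
--         "Project Management": [],
--         "Technical": [],
--         "Analytics": [],
--         "Other": []
--     }
--
--     for role in roles:
--         role_lower = role.lower()
--         if any(keyword in role_lower for keyword in ['account', 'client', 'relationship']):
--             categories["Account Management"].append(role)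
--         elif any(keyword in role_lower for keyword in ['creative', 'design', 'art', 'copy', 'content']):
--             categories["Creative"].append(role)
--         elif any(keyword in role_lower for keyword in ['strategy', 'strategist', 'planning']):
--             categories["Strategy"].append(role)
--         elif any(keyword in role_lower for keyword in ['project', 'program', 'manager', 'coordinator']):
--             categories["Project Management"].append(role)
--         elif any(keyword in role_lower for keyword in ['developer', 'engineer', 'technical', 'tech']):
--             categories["Technical"].append(role)
--         elif any(keyword in role_lower for keyword in ['analyst', 'data', 'research']):
--             categories["Analytics"].append(role)
--         else:
--             categories["Other"].append(role)
--
--     return {k: v for k, v in categories.items() if v}  # Remove empty categories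
-- ===== SOURCE B (Python) =====
-- def _categorize_roles(roles):
--     """Categorize roles by department/function (category-major pass)."""
--     cats = [
--         ("Account Management", ['account', 'client', 'relationship']),
--         ("Creative", ['creative', 'design', 'art', 'copy', 'content']),
--         ("Strategy", ['strategy', 'strategist', 'planning']),
--         ("Project Management", ['project', 'program', 'manager', 'coordinator']),
--         ("Technical", ['developer', 'engineer', 'technical', 'tech']),
--         ("Analytics", ['analyst', 'data', 'research']),
--     ]
--     result = {}
--     earlier = []
--     for name, kws in cats:
--         bucket = [r for r in roles
--                   if any(k in r.lower() for k in kws)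
--                   and not any(k in r.lower() for k in earlier)]
--         if bucket:
--             result[name] = bucket
--         earlier += kws
--     other = [r for r in roles if not any(k in r.lower() for k in earlier)]
--     if other:
--         result["Other"] = other
--     return result
-- ===== Notes on version B (the rewrite author's own statement) =====
-- stated objective: alternative
-- what changed: A makes one role-major pass dispatching each role through an if/elif chain into seven mutable buckets; B makes a category-major pass: for each category in priority order it filters the roles that contain one of its keywords and none of any earlier category's keywords, then collects the leftover roles as 'Other', appending only non-empty buckets.
import Mathlib
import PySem

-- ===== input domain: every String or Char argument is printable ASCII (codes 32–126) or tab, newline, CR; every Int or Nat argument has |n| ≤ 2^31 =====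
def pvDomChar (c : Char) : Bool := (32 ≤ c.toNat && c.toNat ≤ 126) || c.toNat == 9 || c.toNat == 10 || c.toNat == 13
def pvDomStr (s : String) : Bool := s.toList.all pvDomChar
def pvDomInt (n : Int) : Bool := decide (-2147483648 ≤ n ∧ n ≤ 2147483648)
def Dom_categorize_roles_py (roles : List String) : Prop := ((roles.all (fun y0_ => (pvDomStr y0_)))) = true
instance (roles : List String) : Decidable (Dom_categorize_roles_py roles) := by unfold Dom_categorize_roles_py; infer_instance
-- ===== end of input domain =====

-- B replaces A's role-major dispatch loop (one pass appending into seven mutable buckets) by a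
-- category-major pass: for each category in priority order it filters the roles matching its
-- keywords and none of the earlier categories' keywords; objective: alternative decomposition.

-- ===== PORT A =====
def categorize_roles_py (roles : List String) : List (String × List String) :=
  let categories : PySem.Dict String (List String) := PySem.Dict.mk
    [("Account Management", []), ("Creative", []), ("Strategy", []),
     ("Project Management", []), ("Technical", []), ("Analytics", []), ("Other", [])]
  let categories := roles.foldl (fun categories role =>
    let role_lower := PySem.Str.lower role
    if ["account", "client", "relationship"].any (fun keyword => PySem.Str.isIn keyword role_lower) then
      categories.modify "Account Management" [] (· ++ [role])
    else if ["creative", "design", "art", "copy", "content"].any (fun keyword => PySem.Str.isIn keyword role_lower) then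
      categories.modify "Creative" [] (· ++ [role])
    else if ["strategy", "strategist", "planning"].any (fun keyword => PySem.Str.isIn keyword role_lower) then
      categories.modify "Strategy" [] (· ++ [role])
    else if ["project", "program", "manager", "coordinator"].any (fun keyword => PySem.Str.isIn keyword role_lower) then
      categories.modify "Project Management" [] (· ++ [role])
    else if ["developer", "engineer", "technical", "tech"].any (fun keyword => PySem.Str.isIn keyword role_lower) then
      categories.modify "Technical" [] (· ++ [role])
    else if ["analyst", "data", "research"].any (fun keyword => PySem.Str.isIn keyword role_lower) then
      categories.modify "Analytics" [] (· ++ [role])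
    else
      categories.modify "Other" [] (· ++ [role])) categories
  categories.items.filter (fun kv => !kv.2.isEmpty)

-- ===== PORT B =====
def pvCats : List (String × List String) :=
  [("Account Management", ["account", "client", "relationship"]),
   ("Creative", ["creative", "design", "art", "copy", "content"]),
   ("Strategy", ["strategy", "strategist", "planning"]),
   ("Project Management", ["project", "program", "manager", "coordinator"]),
   ("Technical", ["developer", "engineer", "technical", "tech"]),
   ("Analytics", ["analyst", "data", "research"])]

def categorize_roles_py_alt (roles : List String) : List (String × List String) :=
  let st := pvCats.foldl (fun st c =>
    let bucket := roles.filter (fun r =>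
      c.2.any (fun k => PySem.Str.isIn k (PySem.Str.lower r)) &&
      !(st.2.any (fun k => PySem.Str.isIn k (PySem.Str.lower r))))
    (st.1 ++ (if bucket.isEmpty then [] else [(c.1, bucket)]), st.2 ++ c.2))
    (([] : List (String × List String)), ([] : List String))
  let other := roles.filter (fun r => !(st.2.any (fun k => PySem.Str.isIn k (PySem.Str.lower r))))
  st.1 ++ (if other.isEmpty then [] else [("Other", other)])

-- ===== PRECONDITION & SPEC =====
def Spec_categorize_roles_py (roles : List String) (out : List (String × List String)) : Prop := out = categorize_roles_py_alt roles
instance (roles : List String) (out : List (String × List String)) : Decidable (Spec_categorize_roles_py roles out) := by unfold Spec_categorize_roles_py; infer_instance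

-- ===== CLAIM (what is proved, stated in full; the proofs are below) =====
def Claim_equal_categorize_roles_py : Prop := ∀ (roles : List String), Dom_categorize_roles_py roles → Spec_categorize_roles_py roles (categorize_roles_py roles)

-- ===== LEMMAS AND PROOFS =====

def K1 : List String := ["account", "client", "relationship"]
def K2 : List String := ["creative", "design", "art", "copy", "content"]
def K3 : List String := ["strategy", "strategist", "planning"]
def K4 : List String := ["project", "program", "manager", "coordinator"]
def K5 : List String := ["developer", "engineer", "technical", "tech"]
def K6 : List String := ["analyst", "data", "research"]
def E1 : List String := []
def E2 : List String := E1 ++ K1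
def E3 : List String := E2 ++ K2
def E4 : List String := E3 ++ K3
def E5 : List String := E4 ++ K4
def E6 : List String := E5 ++ K5
def E7 : List String := E6 ++ K6

-- f i = the predicate "role belongs in bucket i": matches bucket i's keywords, none of the earlier ones
def f1 (r : String) : Bool := K1.any (fun k => PySem.Str.isIn k (PySem.Str.lower r)) && !(E1.any (fun k => PySem.Str.isIn k (PySem.Str.lower r)))
def f2 (r : String) : Bool := K2.any (fun k => PySem.Str.isIn k (PySem.Str.lower r)) && !(E2.any (fun k => PySem.Str.isIn k (PySem.Str.lower r)))
def f3 (r : String) : Bool := K3.any (fun k => PySem.Str.isIn k (PySem.Str.lower r)) && !(E3.any (fun k => PySem.Str.isIn k (PySem.Str.lower r)))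
def f4 (r : String) : Bool := K4.any (fun k => PySem.Str.isIn k (PySem.Str.lower r)) && !(E4.any (fun k => PySem.Str.isIn k (PySem.Str.lower r)))
def f5 (r : String) : Bool := K5.any (fun k => PySem.Str.isIn k (PySem.Str.lower r)) && !(E5.any (fun k => PySem.Str.isIn k (PySem.Str.lower r)))
def f6 (r : String) : Bool := K6.any (fun k => PySem.Str.isIn k (PySem.Str.lower r)) && !(E6.any (fun k => PySem.Str.isIn k (PySem.Str.lower r)))
def f7 (r : String) : Bool := !(E7.any (fun k => PySem.Str.isIn k (PySem.Str.lower r)))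

-- the loop body of port A, named for the induction (definitionally the lambda in categorize_roles_py)
def pvStepA (categories : PySem.Dict String (List String)) (role : String) : PySem.Dict String (List String) :=
  let role_lower := PySem.Str.lower role
  if ["account", "client", "relationship"].any (fun keyword => PySem.Str.isIn keyword role_lower) then
    categories.modify "Account Management" [] (· ++ [role])
  else if ["creative", "design", "art", "copy", "content"].any (fun keyword => PySem.Str.isIn keyword role_lower) then
    categories.modify "Creative" [] (· ++ [role])
  else if ["strategy", "strategist", "planning"].any (fun keyword => PySem.Str.isIn keyword role_lower) then
    categories.modify "Strategy" [] (· ++ [role])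
  else if ["project", "program", "manager", "coordinator"].any (fun keyword => PySem.Str.isIn keyword role_lower) then
    categories.modify "Project Management" [] (· ++ [role])
  else if ["developer", "engineer", "technical", "tech"].any (fun keyword => PySem.Str.isIn keyword role_lower) then
    categories.modify "Technical" [] (· ++ [role])
  else if ["analyst", "data", "research"].any (fun keyword => PySem.Str.isIn keyword role_lower) then
    categories.modify "Analytics" [] (· ++ [role])
  else
    categories.modify "Other" [] (· ++ [role])

theorem foldA (roles : List String) (a1 a2 a3 a4 a5 a6 a7 : List String) :
    roles.foldl pvStepA (PySem.Dict.mk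
      [("Account Management", a1), ("Creative", a2), ("Strategy", a3), ("Project Management", a4), ("Technical", a5), ("Analytics", a6), ("Other", a7)]) =
    PySem.Dict.mk
      [("Account Management", a1 ++ roles.filter f1), ("Creative", a2 ++ roles.filter f2), ("Strategy", a3 ++ roles.filter f3), ("Project Management", a4 ++ roles.filter f4), ("Technical", a5 ++ roles.filter f5), ("Analytics", a6 ++ roles.filter f6), ("Other", a7 ++ roles.filter f7)] := by
  induction roles generalizing a1 a2 a3 a4 a5 a6 a7 with
  | nil => simp
  | cons r rs ih =>
    by_cases h1 : K1.any (fun k => PySem.Str.isIn k (PySem.Str.lower r)) = true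
    · rw [List.foldl_cons]
      have hs : pvStepA (PySem.Dict.mk
          [("Account Management", a1), ("Creative", a2), ("Strategy", a3), ("Project Management", a4), ("Technical", a5), ("Analytics", a6), ("Other", a7)]) r =
          PySem.Dict.mk
          [("Account Management", a1 ++ [r]), ("Creative", a2), ("Strategy", a3), ("Project Management", a4), ("Technical", a5), ("Analytics", a6), ("Other", a7)] := by
        have hc1 : (["account", "client", "relationship"].any (fun keyword => PySem.Str.isIn keyword (PySem.Str.lower r))) = true := h1
        unfold pvStepA
        rw [if_pos hc1]
        simp [PySem.Dict.modify, PySem.Dict.insert, PySem.Dict.getD, PySem.Dict.get?, PySem.Dict.contains]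
      rw [hs, ih]
      simp only [List.filter_cons, f1, f2, f3, f4, f5, f6, f7, E1, E2, E3, E4, E5, E6, E7,
      List.any_append, List.any_nil, h1, Bool.false_or, Bool.or_false, Bool.true_or,
      Bool.or_true, Bool.not_true, Bool.not_false, Bool.and_true, Bool.true_and,
      Bool.and_false, Bool.false_and] <;> simp
    rw [Bool.not_eq_true] at h1
    by_cases h2 : K2.any (fun k => PySem.Str.isIn k (PySem.Str.lower r)) = true
    · rw [List.foldl_cons]
      have hs : pvStepA (PySem.Dict.mk
          [("Account Management", a1), ("Creative", a2), ("Strategy", a3), ("Project Management", a4), ("Technical", a5), ("Analytics", a6), ("Other", a7)]) r =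
          PySem.Dict.mk
          [("Account Management", a1), ("Creative", a2 ++ [r]), ("Strategy", a3), ("Project Management", a4), ("Technical", a5), ("Analytics", a6), ("Other", a7)] := by
        have hc1 : (["account", "client", "relationship"].any (fun keyword => PySem.Str.isIn keyword (PySem.Str.lower r))) = false := h1
        have hc2 : (["creative", "design", "art", "copy", "content"].any (fun keyword => PySem.Str.isIn keyword (PySem.Str.lower r))) = true := h2
        unfold pvStepA
        rw [if_neg (by rw [hc1]; exact Bool.false_ne_true), if_pos hc2]
        simp [PySem.Dict.modify, PySem.Dict.insert, PySem.Dict.getD, PySem.Dict.get?, PySem.Dict.contains]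
      rw [hs, ih]
      simp only [List.filter_cons, f1, f2, f3, f4, f5, f6, f7, E1, E2, E3, E4, E5, E6, E7,
      List.any_append, List.any_nil, h1, h2, Bool.false_or, Bool.or_false, Bool.true_or,
      Bool.or_true, Bool.not_true, Bool.not_false, Bool.and_true, Bool.true_and,
      Bool.and_false, Bool.false_and] <;> simp
    rw [Bool.not_eq_true] at h2
    by_cases h3 : K3.any (fun k => PySem.Str.isIn k (PySem.Str.lower r)) = true
    · rw [List.foldl_cons]
      have hs : pvStepA (PySem.Dict.mk
          [("Account Management", a1), ("Creative", a2), ("Strategy", a3), ("Project Management", a4), ("Technical", a5), ("Analytics", a6), ("Other", a7)]) r =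
          PySem.Dict.mk
          [("Account Management", a1), ("Creative", a2), ("Strategy", a3 ++ [r]), ("Project Management", a4), ("Technical", a5), ("Analytics", a6), ("Other", a7)] := by
        have hc1 : (["account", "client", "relationship"].any (fun keyword => PySem.Str.isIn keyword (PySem.Str.lower r))) = false := h1
        have hc2 : (["creative", "design", "art", "copy", "content"].any (fun keyword => PySem.Str.isIn keyword (PySem.Str.lower r))) = false := h2
        have hc3 : (["strategy", "strategist", "planning"].any (fun keyword => PySem.Str.isIn keyword (PySem.Str.lower r))) = true := h3
        unfold pvStepA
        rw [if_neg (by rw [hc1]; exact Bool.false_ne_true), if_neg (by rw [hc2]; exact Bool.false_ne_true), if_pos hc3]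
        simp [PySem.Dict.modify, PySem.Dict.insert, PySem.Dict.getD, PySem.Dict.get?, PySem.Dict.contains]
      rw [hs, ih]
      simp only [List.filter_cons, f1, f2, f3, f4, f5, f6, f7, E1, E2, E3, E4, E5, E6, E7,
      List.any_append, List.any_nil, h1, h2, h3, Bool.false_or, Bool.or_false, Bool.true_or,
      Bool.or_true, Bool.not_true, Bool.not_false, Bool.and_true, Bool.true_and,
      Bool.and_false, Bool.false_and] <;> simp
    rw [Bool.not_eq_true] at h3
    by_cases h4 : K4.any (fun k => PySem.Str.isIn k (PySem.Str.lower r)) = true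
    · rw [List.foldl_cons]
      have hs : pvStepA (PySem.Dict.mk
          [("Account Management", a1), ("Creative", a2), ("Strategy", a3), ("Project Management", a4), ("Technical", a5), ("Analytics", a6), ("Other", a7)]) r =
          PySem.Dict.mk
          [("Account Management", a1), ("Creative", a2), ("Strategy", a3), ("Project Management", a4 ++ [r]), ("Technical", a5), ("Analytics", a6), ("Other", a7)] := by
        have hc1 : (["account", "client", "relationship"].any (fun keyword => PySem.Str.isIn keyword (PySem.Str.lower r))) = false := h1
        have hc2 : (["creative", "design", "art", "copy", "content"].any (fun keyword => PySem.Str.isIn keyword (PySem.Str.lower r))) = false := h2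
        have hc3 : (["strategy", "strategist", "planning"].any (fun keyword => PySem.Str.isIn keyword (PySem.Str.lower r))) = false := h3
        have hc4 : (["project", "program", "manager", "coordinator"].any (fun keyword => PySem.Str.isIn keyword (PySem.Str.lower r))) = true := h4
        unfold pvStepA
        rw [if_neg (by rw [hc1]; exact Bool.false_ne_true), if_neg (by rw [hc2]; exact Bool.false_ne_true), if_neg (by rw [hc3]; exact Bool.false_ne_true), if_pos hc4]
        simp [PySem.Dict.modify, PySem.Dict.insert, PySem.Dict.getD, PySem.Dict.get?, PySem.Dict.contains]
      rw [hs, ih]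
      simp only [List.filter_cons, f1, f2, f3, f4, f5, f6, f7, E1, E2, E3, E4, E5, E6, E7,
      List.any_append, List.any_nil, h1, h2, h3, h4, Bool.false_or, Bool.or_false, Bool.true_or,
      Bool.or_true, Bool.not_true, Bool.not_false, Bool.and_true, Bool.true_and,
      Bool.and_false, Bool.false_and] <;> simp
    rw [Bool.not_eq_true] at h4
    by_cases h5 : K5.any (fun k => PySem.Str.isIn k (PySem.Str.lower r)) = true
    · rw [List.foldl_cons]
      have hs : pvStepA (PySem.Dict.mk
          [("Account Management", a1), ("Creative", a2), ("Strategy", a3), ("Project Management", a4), ("Technical", a5), ("Analytics", a6), ("Other", a7)]) r =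
          PySem.Dict.mk
          [("Account Management", a1), ("Creative", a2), ("Strategy", a3), ("Project Management", a4), ("Technical", a5 ++ [r]), ("Analytics", a6), ("Other", a7)] := by
        have hc1 : (["account", "client", "relationship"].any (fun keyword => PySem.Str.isIn keyword (PySem.Str.lower r))) = false := h1
        have hc2 : (["creative", "design", "art", "copy", "content"].any (fun keyword => PySem.Str.isIn keyword (PySem.Str.lower r))) = false := h2
        have hc3 : (["strategy", "strategist", "planning"].any (fun keyword => PySem.Str.isIn keyword (PySem.Str.lower r))) = false := h3
        have hc4 : (["project", "program", "manager", "coordinator"].any (fun keyword => PySem.Str.isIn keyword (PySem.Str.lower r))) = false := h4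
        have hc5 : (["developer", "engineer", "technical", "tech"].any (fun keyword => PySem.Str.isIn keyword (PySem.Str.lower r))) = true := h5
        unfold pvStepA
        rw [if_neg (by rw [hc1]; exact Bool.false_ne_true), if_neg (by rw [hc2]; exact Bool.false_ne_true), if_neg (by rw [hc3]; exact Bool.false_ne_true), if_neg (by rw [hc4]; exact Bool.false_ne_true), if_pos hc5]
        simp [PySem.Dict.modify, PySem.Dict.insert, PySem.Dict.getD, PySem.Dict.get?, PySem.Dict.contains]
      rw [hs, ih]
      simp only [List.filter_cons, f1, f2, f3, f4, f5, f6, f7, E1, E2, E3, E4, E5, E6, E7,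
      List.any_append, List.any_nil, h1, h2, h3, h4, h5, Bool.false_or, Bool.or_false, Bool.true_or,
      Bool.or_true, Bool.not_true, Bool.not_false, Bool.and_true, Bool.true_and,
      Bool.and_false, Bool.false_and] <;> simp
    rw [Bool.not_eq_true] at h5
    by_cases h6 : K6.any (fun k => PySem.Str.isIn k (PySem.Str.lower r)) = true
    · rw [List.foldl_cons]
      have hs : pvStepA (PySem.Dict.mk
          [("Account Management", a1), ("Creative", a2), ("Strategy", a3), ("Project Management", a4), ("Technical", a5), ("Analytics", a6), ("Other", a7)]) r =
          PySem.Dict.mk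
          [("Account Management", a1), ("Creative", a2), ("Strategy", a3), ("Project Management", a4), ("Technical", a5), ("Analytics", a6 ++ [r]), ("Other", a7)] := by
        have hc1 : (["account", "client", "relationship"].any (fun keyword => PySem.Str.isIn keyword (PySem.Str.lower r))) = false := h1
        have hc2 : (["creative", "design", "art", "copy", "content"].any (fun keyword => PySem.Str.isIn keyword (PySem.Str.lower r))) = false := h2
        have hc3 : (["strategy", "strategist", "planning"].any (fun keyword => PySem.Str.isIn keyword (PySem.Str.lower r))) = false := h3
        have hc4 : (["project", "program", "manager", "coordinator"].any (fun keyword => PySem.Str.isIn keyword (PySem.Str.lower r))) = false := h4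
        have hc5 : (["developer", "engineer", "technical", "tech"].any (fun keyword => PySem.Str.isIn keyword (PySem.Str.lower r))) = false := h5
        have hc6 : (["analyst", "data", "research"].any (fun keyword => PySem.Str.isIn keyword (PySem.Str.lower r))) = true := h6
        unfold pvStepA
        rw [if_neg (by rw [hc1]; exact Bool.false_ne_true), if_neg (by rw [hc2]; exact Bool.false_ne_true), if_neg (by rw [hc3]; exact Bool.false_ne_true), if_neg (by rw [hc4]; exact Bool.false_ne_true), if_neg (by rw [hc5]; exact Bool.false_ne_true), if_pos hc6]
        simp [PySem.Dict.modify, PySem.Dict.insert, PySem.Dict.getD, PySem.Dict.get?, PySem.Dict.contains]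
      rw [hs, ih]
      simp only [List.filter_cons, f1, f2, f3, f4, f5, f6, f7, E1, E2, E3, E4, E5, E6, E7,
      List.any_append, List.any_nil, h1, h2, h3, h4, h5, h6, Bool.false_or, Bool.or_false, Bool.true_or,
      Bool.or_true, Bool.not_true, Bool.not_false, Bool.and_true, Bool.true_and,
      Bool.and_false, Bool.false_and] <;> simp
    rw [Bool.not_eq_true] at h6
    rw [List.foldl_cons]
    have hs : pvStepA (PySem.Dict.mk
        [("Account Management", a1), ("Creative", a2), ("Strategy", a3), ("Project Management", a4), ("Technical", a5), ("Analytics", a6), ("Other", a7)]) r =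
        PySem.Dict.mk
        [("Account Management", a1), ("Creative", a2), ("Strategy", a3), ("Project Management", a4), ("Technical", a5), ("Analytics", a6), ("Other", a7 ++ [r])] := by
      have hc1 : (["account", "client", "relationship"].any (fun keyword => PySem.Str.isIn keyword (PySem.Str.lower r))) = false := h1
      have hc2 : (["creative", "design", "art", "copy", "content"].any (fun keyword => PySem.Str.isIn keyword (PySem.Str.lower r))) = false := h2
      have hc3 : (["strategy", "strategist", "planning"].any (fun keyword => PySem.Str.isIn keyword (PySem.Str.lower r))) = false := h3
      have hc4 : (["project", "program", "manager", "coordinator"].any (fun keyword => PySem.Str.isIn keyword (PySem.Str.lower r))) = false := h4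
      have hc5 : (["developer", "engineer", "technical", "tech"].any (fun keyword => PySem.Str.isIn keyword (PySem.Str.lower r))) = false := h5
      have hc6 : (["analyst", "data", "research"].any (fun keyword => PySem.Str.isIn keyword (PySem.Str.lower r))) = false := h6
      unfold pvStepA
      rw [if_neg (by rw [hc1]; exact Bool.false_ne_true), if_neg (by rw [hc2]; exact Bool.false_ne_true), if_neg (by rw [hc3]; exact Bool.false_ne_true), if_neg (by rw [hc4]; exact Bool.false_ne_true), if_neg (by rw [hc5]; exact Bool.false_ne_true), if_neg (by rw [hc6]; exact Bool.false_ne_true)]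
      simp [PySem.Dict.modify, PySem.Dict.insert, PySem.Dict.getD, PySem.Dict.get?, PySem.Dict.contains]
    rw [hs, ih]
    simp only [List.filter_cons, f1, f2, f3, f4, f5, f6, f7, E1, E2, E3, E4, E5, E6, E7,
      List.any_append, List.any_nil, h1, h2, h3, h4, h5, h6, Bool.false_or, Bool.or_false, Bool.true_or,
      Bool.or_true, Bool.not_true, Bool.not_false, Bool.and_true, Bool.true_and,
      Bool.and_false, Bool.false_and] <;> simp

theorem A_as_filter (roles : List String) :
    categorize_roles_py roles =
    (PySem.Dict.mk
      [("Account Management", roles.filter f1), ("Creative", roles.filter f2), ("Strategy", roles.filter f3), ("Project Management", roles.filter f4), ("Technical", roles.filter f5), ("Analytics", roles.filter f6), ("Other", roles.filter f7)]).items.filter (fun kv => !kv.2.isEmpty) := by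
  have h0 : categorize_roles_py roles =
      (roles.foldl pvStepA (PySem.Dict.mk
        [("Account Management", []), ("Creative", []), ("Strategy", []), ("Project Management", []), ("Technical", []), ("Analytics", []), ("Other", [])])).items.filter (fun kv => !kv.2.isEmpty) := rfl
  rw [h0, foldA]
  simp

theorem B_as_filter (roles : List String) :
    categorize_roles_py_alt roles =
    ((((((if (roles.filter f1).isEmpty then [] else [("Account Management", roles.filter f1)]) ++
      (if (roles.filter f2).isEmpty then [] else [("Creative", roles.filter f2)])) ++
      (if (roles.filter f3).isEmpty then [] else [("Strategy", roles.filter f3)])) ++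
      (if (roles.filter f4).isEmpty then [] else [("Project Management", roles.filter f4)])) ++
      (if (roles.filter f5).isEmpty then [] else [("Technical", roles.filter f5)])) ++
      (if (roles.filter f6).isEmpty then [] else [("Analytics", roles.filter f6)])) ++
      (if (roles.filter f7).isEmpty then [] else [("Other", roles.filter f7)]) := rfl

-- ===== VERDICT (by name: the statement is the Claim_ definition above) =====
theorem categorize_roles_py_spec : Claim_equal_categorize_roles_py := by
  intro roles _
  show categorize_roles_py roles = categorize_roles_py_alt roles
  rw [A_as_filter, B_as_filter]
  by_cases hb1 : (roles.filter f1).isEmpty = true <;>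
    by_cases hb2 : (roles.filter f2).isEmpty = true <;>
    by_cases hb3 : (roles.filter f3).isEmpty = true <;>
    by_cases hb4 : (roles.filter f4).isEmpty = true <;>
    by_cases hb5 : (roles.filter f5).isEmpty = true <;>
    by_cases hb6 : (roles.filter f6).isEmpty = true <;>
    by_cases hb7 : (roles.filter f7).isEmpty = true <;>
    simp [hb1, hb2, hb3, hb4, hb5, hb6, hb7]
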